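-- pv_equiv track=rewrite | github.com/beaverble/NIPA-Water-Demand-Forecasting | predict_excessive.py | cal_excessive
-- ===== SOURCE A (Python) =====
-- def cal_excessive(total_usage):
--     total_price = []
--     excessive_grade = []
--     for i in range(len(total_usage)):
--         if total_usage[i] <= 50:
--             price = 860 + (total_usage[i] * 620)
--             total_price.append(price)
--             excessive_grade.append(1)
--         elif total_usage[i] <= 100:
--             price = 860 + ((50 * 620) + ((total_usage[i] - 50) * 850))
--             total_price.append(price)
--             excessive_grade.append(2)
--         else:
--             price = 860 + ((50 * 620) + (50 * 850) + ((total_usage[i] - 100) * 1040))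
--             total_price.append(price)
--             excessive_grade.append(3)
--
--     return total_price, excessive_grade
-- ===== SOURCE B (Python) =====
-- BASE = 860
-- BRACKETS = [(50, 620), (50, 850), (None, 1040)]
--
-- def cal_excessive(total_usage):
--     total_price = []
--     excessive_grade = []
--     for u in total_usage:
--         price, rem, grade = BASE, u, 0
--         for cap, rate in BRACKETS:
--             grade += 1
--             take = rem if cap is None else min(rem, cap)
--             price += take * rate
--             rem -= take
--             if cap is None or rem <= 0:
--                 break
--         total_price.append(price)
--         excessive_grade.append(grade)
--     return total_price, excessive_grade
-- ===== Notes on version B (the rewrite author's own statement) =====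
-- stated objective: simpler
-- what changed: Replaces the three hard-coded if/elif price formulas with a single accumulation walk over a (cap, rate) bracket table that also yields the grade as the bracket index where the usage is consumed.
import Mathlib
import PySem

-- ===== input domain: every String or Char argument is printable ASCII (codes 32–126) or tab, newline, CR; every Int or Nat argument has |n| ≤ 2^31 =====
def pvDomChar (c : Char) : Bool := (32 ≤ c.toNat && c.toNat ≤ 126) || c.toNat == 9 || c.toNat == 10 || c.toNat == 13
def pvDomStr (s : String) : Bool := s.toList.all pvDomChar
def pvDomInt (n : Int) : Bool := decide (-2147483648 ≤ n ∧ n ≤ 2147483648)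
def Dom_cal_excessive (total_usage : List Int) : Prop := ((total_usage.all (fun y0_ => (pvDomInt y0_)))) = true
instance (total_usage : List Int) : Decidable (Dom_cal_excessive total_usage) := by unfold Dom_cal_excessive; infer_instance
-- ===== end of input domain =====

-- B replaces A's three hard-coded if/elif price formulas with one accumulation walk over a (cap, rate) bracket table (objective: simpler).
-- ===== PORT A =====
def cal_excessive (total_usage : List Int) : List Int × List Int :=
  (PySem.List.pyRange 0 (PySem.List.len total_usage)).foldl
    (fun (st : List Int × List Int) i =>
      let u := PySem.List.pyGetD total_usage i 0    -- total_usage[i]; i is always in range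
      if u ≤ 50 then
        (st.1 ++ [860 + u * 620], st.2 ++ [1])
      else if u ≤ 100 then
        (st.1 ++ [860 + (50 * 620 + (u - 50) * 850)], st.2 ++ [2])
      else
        (st.1 ++ [860 + (50 * 620 + 50 * 850 + (u - 100) * 1040)], st.2 ++ [3]))
    ([], [])

-- ===== PORT B =====
def pvBrackets : List (Option Int × Int) := [(some 50, 620), (some 50, 850), (none, 1040)]

-- the inner 'for cap, rate in BRACKETS: ... break' loop of Source B
def pvTierWalk : List (Option Int × Int) → Int → Int → Int → Int × Int
  | [], price, _, grade => (price, grade)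
  | (cap, rate) :: rest, price, rem, grade =>
      let grade' := grade + 1
      let take := match cap with | none => rem | some c => min rem c
      let price' := price + take * rate
      let rem' := rem - take
      if cap.isNone || rem' ≤ 0 then (price', grade') else pvTierWalk rest price' rem' grade'

def cal_excessive_alt (total_usage : List Int) : List Int × List Int :=
  total_usage.foldl
    (fun (st : List Int × List Int) u =>
      let pg := pvTierWalk pvBrackets 860 u 0
      (st.1 ++ [pg.1], st.2 ++ [pg.2]))
    ([], [])

-- ===== PRECONDITION & SPEC =====
def Spec_cal_excessive (total_usage : List Int) (out : List Int × List Int) : Prop := out = cal_excessive_alt total_usage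
instance (total_usage : List Int) (out : List Int × List Int) : Decidable (Spec_cal_excessive total_usage out) := by unfold Spec_cal_excessive; infer_instance

-- ===== CLAIM (what is proved, stated in full; the proofs are below) =====
def Claim_equal_cal_excessive : Prop := ∀ (total_usage : List Int), Dom_cal_excessive total_usage → Spec_cal_excessive total_usage (cal_excessive total_usage)

-- ===== LEMMAS AND PROOFS =====

-- per-element values of A's branches
def pvPriceA (u : Int) : Int :=
  if u ≤ 50 then 860 + u * 620
  else if u ≤ 100 then 860 + (50 * 620 + (u - 50) * 850)
  else 860 + (50 * 620 + 50 * 850 + (u - 100) * 1040)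

def pvGradeA (u : Int) : Int :=
  if u ≤ 50 then 1 else if u ≤ 100 then 2 else 3

theorem pvTierWalk_eq (u : Int) : pvTierWalk pvBrackets 860 u 0 = (pvPriceA u, pvGradeA u) := by
  simp only [pvBrackets, pvTierWalk, pvPriceA, pvGradeA]
  split_ifs <;> simp_all <;> omega

theorem pv_A_as_maps (xs : List Int) :
    cal_excessive xs = (xs.map pvPriceA, xs.map pvGradeA) := by
  unfold cal_excessive
  have hbody : (fun (st : List Int × List Int) i =>
      let u := PySem.List.pyGetD xs i 0
      if u ≤ 50 then
        (st.1 ++ [860 + u * 620], st.2 ++ [1])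
      else if u ≤ 100 then
        (st.1 ++ [860 + (50 * 620 + (u - 50) * 850)], st.2 ++ [2])
      else
        (st.1 ++ [860 + (50 * 620 + 50 * 850 + (u - 100) * 1040)], st.2 ++ [3]))
      = (fun (st : List Int × List Int) i =>
          (st.1 ++ [pvPriceA (PySem.List.pyGetD xs i 0)],
           st.2 ++ [pvGradeA (PySem.List.pyGetD xs i 0)])) := by
    funext st i
    simp only [pvPriceA, pvGradeA]
    split_ifs <;> rfl
  rw [hbody]
  rw [PySem.List.foldl_prod_mk (fun s1 i => s1 ++ [pvPriceA (PySem.List.pyGetD xs i 0)])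
        (fun s2 i => s2 ++ [pvGradeA (PySem.List.pyGetD xs i 0)]),
      PySem.List.foldl_append_singleton_eq_map, PySem.List.foldl_append_singleton_eq_map]
  have h1 : (PySem.List.pyRange 0 (PySem.List.len xs)).map
      (fun i => pvPriceA (PySem.List.pyGetD xs i 0))
      = (((PySem.List.pyRange 0 (PySem.List.len xs)).map
          (fun j => PySem.List.pyGetD xs j 0)).map pvPriceA) := by
    rw [List.map_map]; rfl
  have h2 : (PySem.List.pyRange 0 (PySem.List.len xs)).map
      (fun i => pvGradeA (PySem.List.pyGetD xs i 0))
      = (((PySem.List.pyRange 0 (PySem.List.len xs)).map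
          (fun j => PySem.List.pyGetD xs j 0)).map pvGradeA) := by
    rw [List.map_map]; rfl
  rw [h1, h2, PySem.List.map_pyGetD_pyRange_zero]
  simp

theorem pv_B_as_maps (xs : List Int) :
    cal_excessive_alt xs = (xs.map pvPriceA, xs.map pvGradeA) := by
  unfold cal_excessive_alt
  have hbody : (fun (st : List Int × List Int) u =>
      let pg := pvTierWalk pvBrackets 860 u 0
      (st.1 ++ [pg.1], st.2 ++ [pg.2]))
      = (fun (st : List Int × List Int) u =>
          (st.1 ++ [pvPriceA u], st.2 ++ [pvGradeA u])) := by
    funext st u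
    simp [pvTierWalk_eq]
  rw [hbody]
  rw [PySem.List.foldl_prod_mk (fun s1 u => s1 ++ [pvPriceA u]) (fun s2 u => s2 ++ [pvGradeA u]),
      PySem.List.foldl_append_singleton_eq_map, PySem.List.foldl_append_singleton_eq_map]
  simp

-- ===== VERDICT (by name: the statement is the Claim_ definition above) =====
theorem cal_excessive_spec : Claim_equal_cal_excessive := by
  intro xs _
  unfold Spec_cal_excessive
  rw [pv_A_as_maps, pv_B_as_maps]
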